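-- pv_equiv track=rewrite | github.com/fantadrinker/aoc2023 | day2/part1.py | check_game
-- ===== SOURCE A (Python) =====
-- num_red = 12
--
-- num_green = 13
--
-- num_blue = 14
--
-- def check_game(game):
--     for draw in game:
--         if draw.get("red", 0) > num_red:
--             return False
--         if draw.get("green", 0) > num_green:
--             return False
--         if draw.get("blue", 0) > num_blue:
--             return False
--     return True
-- ===== SOURCE B (Python) =====
-- def check_game(game):
--     max_red = max((d.get("red", 0) for d in game), default=0)
--     max_green = max((d.get("green", 0) for d in game), default=0)
--     max_blue = max((d.get("blue", 0) for d in game), default=0)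
--     return max_red <= 12 and max_green <= 13 and max_blue <= 14
-- ===== Notes on version B (the rewrite author's own statement) =====
-- stated objective: alternative
-- what changed: B reduces the game to three per-color maxima (max with default=0) and then performs one fixed comparison, instead of A's per-draw early-exit scan with three checks per draw.
import Mathlib
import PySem

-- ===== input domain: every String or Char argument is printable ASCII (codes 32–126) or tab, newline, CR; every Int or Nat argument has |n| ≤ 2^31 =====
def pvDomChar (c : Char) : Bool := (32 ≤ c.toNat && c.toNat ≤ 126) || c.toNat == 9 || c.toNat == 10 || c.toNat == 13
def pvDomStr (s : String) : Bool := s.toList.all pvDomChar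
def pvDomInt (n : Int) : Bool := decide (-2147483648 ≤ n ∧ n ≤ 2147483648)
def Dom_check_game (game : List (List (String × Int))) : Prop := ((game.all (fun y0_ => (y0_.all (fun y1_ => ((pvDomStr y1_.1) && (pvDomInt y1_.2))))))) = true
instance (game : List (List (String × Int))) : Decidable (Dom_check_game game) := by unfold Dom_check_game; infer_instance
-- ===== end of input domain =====

-- B reduces the game to three per-color maxima first, then one fixed comparison; A scans draw by draw with early exit.

-- ===== PORT A =====
def check_game (game : List (List (String × Int))) : Bool :=
  match game with
  | [] => true
  | draw :: rest =>
    if (PySem.Dict.mk draw).getD "red" 0 > 12 then false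
    else if (PySem.Dict.mk draw).getD "green" 0 > 13 then false
    else if (PySem.Dict.mk draw).getD "blue" 0 > 14 then false
    else check_game rest

-- ===== PORT B =====
-- max(gen, default=0): default when empty, otherwise fold of max over the values
def maxColor (game : List (List (String × Int))) (c : String) : Int :=
  match game.map (fun d => (PySem.Dict.mk d).getD c 0) with
  | [] => 0
  | v :: vs => vs.foldl max v

def check_game_alt (game : List (List (String × Int))) : Bool :=
  maxColor game "red" ≤ 12 && maxColor game "green" ≤ 13 && maxColor game "blue" ≤ 14

-- ===== PRECONDITION & SPEC =====
def Spec_check_game (game : List (List (String × Int))) (out : Bool) : Prop := out = check_game_alt game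
instance (game : List (List (String × Int))) (out : Bool) : Decidable (Spec_check_game game out) := by unfold Spec_check_game; infer_instance

-- ===== CLAIM (what is proved, stated in full; the proofs are below) =====
def Claim_equal_check_game : Prop := ∀ (game : List (List (String × Int))), Dom_check_game game → Spec_check_game game (check_game game)

-- ===== LEMMAS AND PROOFS =====

theorem foldl_max_le_iff (l : List Int) (a k : Int) :
    l.foldl max a ≤ k ↔ a ≤ k ∧ ∀ x ∈ l, x ≤ k := by
  induction l generalizing a with
  | nil => simp
  | cons b t ih =>
    simp only [List.foldl_cons, ih, max_le_iff, List.mem_cons]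
    constructor
    · rintro ⟨⟨ha, hb⟩, ht⟩
      refine ⟨ha, fun x hx => ?_⟩
      rcases hx with rfl | hx
      · exact hb
      · exact ht x hx
    · rintro ⟨ha, h⟩
      exact ⟨⟨ha, h b (Or.inl rfl)⟩, fun x hx => h x (Or.inr hx)⟩

theorem maxColor_le_iff (game : List (List (String × Int))) (c : String) (k : Int)
    (hk : 0 ≤ k) :
    maxColor game c ≤ k ↔ ∀ d ∈ game, (PySem.Dict.mk d).getD c 0 ≤ k := by
  cases game with
  | nil => simpa [maxColor]
  | cons d rest =>
    simp only [maxColor, List.map_cons, foldl_max_le_iff, List.mem_cons]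
    constructor
    · rintro ⟨hd, h⟩ x hx
      rcases hx with rfl | hx
      · exact hd
      · exact h _ (List.mem_map_of_mem hx)
    · rintro h
      refine ⟨h d (Or.inl rfl), ?_⟩
      rintro x hx
      rcases List.mem_map.mp hx with ⟨e, he, rfl⟩
      exact h e (Or.inr he)

theorem check_game_eq_true_iff (game : List (List (String × Int))) :
    check_game game = true ↔ ∀ d ∈ game,
      (PySem.Dict.mk d).getD "red" 0 ≤ 12 ∧ (PySem.Dict.mk d).getD "green" 0 ≤ 13 ∧
      (PySem.Dict.mk d).getD "blue" 0 ≤ 14 := by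
  induction game with
  | nil => simp [check_game]
  | cons d rest ih =>
    simp only [check_game, List.mem_cons]
    split_ifs with h1 h2 h3
    · constructor
      · intro h; cases h
      · intro h; exact absurd ((h d (Or.inl rfl)).1) (by omega)
    · constructor
      · intro h; cases h
      · intro h; exact absurd ((h d (Or.inl rfl)).2.1) (by omega)
    · constructor
      · intro h; cases h
      · intro h; exact absurd ((h d (Or.inl rfl)).2.2) (by omega)
    · rw [ih]
      constructor
      · intro h x hx
        rcases hx with rfl | hx
        · exact ⟨by omega, by omega, by omega⟩
        · exact h x hx
      · intro h x hx; exact h x (Or.inr hx)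

-- ===== VERDICT (by name: the statement is the Claim_ definition above) =====
theorem check_game_spec : Claim_equal_check_game := by
  intro game _
  unfold Spec_check_game
  rw [Bool.eq_iff_iff, check_game_eq_true_iff]
  simp only [check_game_alt, Bool.and_eq_true, decide_eq_true_eq]
  rw [maxColor_le_iff game "red" 12 (by norm_num),
    maxColor_le_iff game "green" 13 (by norm_num),
    maxColor_le_iff game "blue" 14 (by norm_num)]
  constructor
  · intro h
    exact ⟨⟨fun d hd => (h d hd).1, fun d hd => (h d hd).2.1⟩, fun d hd => (h d hd).2.2⟩
  · rintro ⟨⟨hr, hg⟩, hb⟩ d hd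
    exact ⟨hr d hd, hg d hd, hb d hd⟩
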